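-- pv_equiv track=rewrite | github.com/YellowjacketXVI/Project_Greenlight | greenlight/agents/dialogue_consensus.py | _parse_detection_response
-- ===== SOURCE A (Python) =====
-- from typing import List, Dict, Optional, Tuple, Callable, Any
--
-- def _parse_detection_response(response: str) -> Tuple[bool, List[str], str]:
--     """
--     Parse agent response for dialogue detection.
--
--     Returns:
--         (has_dialogue, characters, reasoning)
--     """
--     lines = response.strip().split('\n')
--     has_dialogue = False
--     characters = []
--     reasoning = ""
--
--     for line in lines:
--         line = line.strip()
--         if line.startswith("DIALOGUE:"):
--             vote_text = line.split(":", 1)[1].strip().upper()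
--             has_dialogue = "YES" in vote_text
--         elif line.startswith("CHARACTERS:"):
--             char_text = line.split(":", 1)[1].strip()
--             # Parse character list (handle various formats)
--             char_text = char_text.strip("[]")
--             if char_text and char_text.lower() not in ["none", "unknown", "n/a"]:
--                 characters = [c.strip() for c in char_text.split(",")]
--         elif line.startswith("REASONING:"):
--             reasoning = line.split(":", 1)[1].strip()
--
--     return has_dialogue, characters, reasoning
-- ===== SOURCE B (Python) =====
-- from typing import List, Tuple
--
--
-- def _parse_detection_response(response: str) -> Tuple[bool, List[str], str]:
--     """Parse agent response for dialogue detection (last occurrence of each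
--     field wins), by three independent backward searches instead of one
--     accumulating forward loop."""
--     lines = [ln.strip() for ln in response.strip().split('\n')]
--
--     def last_payload(prefix, ok=None):
--         # value of the LAST line starting with `prefix` (and accepted by `ok`)
--         for ln in reversed(lines):
--             if ln.startswith(prefix):
--                 v = ln.split(":", 1)[1]
--                 if ok is None or ok(v):
--                     return v
--         return None
--
--     def char_list(v):
--         t = v.strip().strip("[]")
--         if not t or t.lower() in ("none", "unknown", "n/a"):
--             return []
--         return [c.strip() for c in t.split(",")]
--
--     d = last_payload("DIALOGUE:")
--     has_dialogue = d is not None and "YES" in d.strip().upper()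
--
--     c = last_payload("CHARACTERS:", lambda v: char_list(v) != [])
--     characters = char_list(c) if c is not None else []
--
--     r = last_payload("REASONING:")
--     reasoning = r.strip() if r is not None else ""
--
--     return has_dialogue, characters, reasoning
-- ===== Notes on version B (the rewrite author's own statement) =====
-- stated objective: alternative
-- what changed: Replaces A's single forward loop mutating three accumulators with three independent backward searches, each returning the payload of the last matching (and, for CHARACTERS, valid) line.
import Mathlib
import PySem

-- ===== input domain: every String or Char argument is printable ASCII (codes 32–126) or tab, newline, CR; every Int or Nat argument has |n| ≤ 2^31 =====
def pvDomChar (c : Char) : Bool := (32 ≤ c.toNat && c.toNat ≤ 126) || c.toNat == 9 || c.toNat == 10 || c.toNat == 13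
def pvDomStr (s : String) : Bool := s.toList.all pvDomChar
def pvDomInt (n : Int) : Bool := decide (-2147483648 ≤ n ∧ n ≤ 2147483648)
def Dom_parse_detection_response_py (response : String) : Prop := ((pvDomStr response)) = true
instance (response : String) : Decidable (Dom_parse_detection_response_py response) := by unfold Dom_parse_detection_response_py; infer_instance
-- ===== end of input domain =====

-- B replaces A's single accumulating forward loop by three independent backward
-- searches over the lines (last matching line per field wins); same return value.

-- shared literal for `line.split(":", 1)[1]` (both Pythons contain this expression)
def pvPayload (line : String) : String :=
  ((PySem.Str.splitMax? line ":" 1).getD []).getD 1 ""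

-- ===== PORT A =====
def pvStep (st : Bool × List String × String) (l : String) : Bool × List String × String :=
  let line := PySem.Str.strip l
  if PySem.Str.startswith line "DIALOGUE:" then
    (PySem.Str.isIn "YES" (PySem.Str.upper (PySem.Str.strip (pvPayload line))), st.2.1, st.2.2)
  else if PySem.Str.startswith line "CHARACTERS:" then
    let ct := PySem.Str.stripChars (PySem.Str.strip (pvPayload line)) "[]"
    if ct ≠ "" ∧ PySem.Str.lower ct ∉ (["none", "unknown", "n/a"] : List String) then
      (st.1, ((PySem.Str.split? ct ",").getD []).map PySem.Str.strip, st.2.2)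
    else st
  else if PySem.Str.startswith line "REASONING:" then
    (st.1, st.2.1, PySem.Str.strip (pvPayload line))
  else st

def parse_detection_response_py (response : String) : Bool × List String × String :=
  ((PySem.Str.split? (PySem.Str.strip response) "\n").getD []).foldl pvStep (false, [], "")

-- ===== PORT B =====
-- B's `char_list` helper
def pvCharList (v : String) : List String :=
  let t := PySem.Str.stripChars (PySem.Str.strip v) "[]"
  if t = "" ∨ PySem.Str.lower t ∈ (["none", "unknown", "n/a"] : List String) then []
  else ((PySem.Str.split? t ",").getD []).map PySem.Str.strip

-- B's `last_payload`: scan the reversed line list, first hit accepted by `ok` wins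
def pvLastPayload (rlines : List String) (pre : String) (ok : String → Bool) : Option String :=
  match rlines with
  | [] => none
  | ln :: rest =>
      if PySem.Str.startswith ln pre && ok (pvPayload ln) then some (pvPayload ln)
      else pvLastPayload rest pre ok

def parse_detection_response_py_alt (response : String) : Bool × List String × String :=
  let rlines := (((PySem.Str.split? (PySem.Str.strip response) "\n").getD []).map PySem.Str.strip).reverse
  let hd := (pvLastPayload rlines "DIALOGUE:" (fun _ => true)).elim false
    (fun v => PySem.Str.isIn "YES" (PySem.Str.upper (PySem.Str.strip v)))
  let ch := (pvLastPayload rlines "CHARACTERS:" (fun v => decide (pvCharList v ≠ []))).elim []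
    pvCharList
  let rs := (pvLastPayload rlines "REASONING:" (fun _ => true)).elim "" PySem.Str.strip
  (hd, ch, rs)

-- ===== PRECONDITION & SPEC =====
def Spec_parse_detection_response_py (response : String) (out : Bool × List String × String) : Prop := out = parse_detection_response_py_alt response
instance (response : String) (out : Bool × List String × String) : Decidable (Spec_parse_detection_response_py response out) := by unfold Spec_parse_detection_response_py; infer_instance

-- ===== CLAIM (what is proved, stated in full; the proofs are below) =====
def Claim_equal_parse_detection_response_py : Prop := ∀ (response : String), Dom_parse_detection_response_py response → Spec_parse_detection_response_py response (parse_detection_response_py response)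

-- ===== LEMMAS AND PROOFS =====

lemma pvLastPayload_append (l1 l2 : List String) (p : String) (ok : String → Bool) :
    pvLastPayload (l1 ++ l2) p ok = (pvLastPayload l1 p ok).or (pvLastPayload l2 p ok) := by
  induction l1 with
  | nil => simp [pvLastPayload]
  | cons a t ih =>
      simp only [List.cons_append, pvLastPayload]
      split <;> simp [ih]

lemma pvSplitOn_go_ne_nil (sep : List Char) (fuel : Nat) (l cur : List Char)
    (acc : List (List Char)) : PySem.Chars.splitOn.go sep fuel l cur acc ≠ [] := by
  induction fuel generalizing l cur acc with
  | zero => simp [PySem.Chars.splitOn.go]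
  | succ n ih =>
      cases l with
      | nil => simp [PySem.Chars.splitOn.go]
      | cons c rest =>
          rw [PySem.Chars.splitOn.go]
          split <;> exact ih _ _ _

lemma pvSplit_ne_nil (s : String) :
    (PySem.Str.split? s ",").getD [] ≠ [] := by
  simp [PySem.Str.split?, PySem.Chars.split?, PySem.Chars.splitOn, pvSplitOn_go_ne_nil]

lemma pvChars_excl (s p q : List Char) (hp : PySem.Chars.startswith s p = true)
    (hpq : ¬ p <+: q) (hqp : ¬ q <+: p) : PySem.Chars.startswith s q = false := by
  by_contra h
  rw [Bool.not_eq_false] at h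
  rw [PySem.Chars.startswith_iff] at hp h
  rcases List.prefix_or_prefix_of_prefix hp h with h' | h'
  · exact hpq h'
  · exact hqp h'

lemma pvCharList_eq_nil_iff (v : String) :
    pvCharList v = [] ↔
      (PySem.Str.stripChars (PySem.Str.strip v) "[]" = "" ∨
       PySem.Str.lower (PySem.Str.stripChars (PySem.Str.strip v) "[]") ∈
         (["none", "unknown", "n/a"] : List String)) := by
  simp only [pvCharList]
  split_ifs with h
  · simpa using h
  · simp [pvSplit_ne_nil]
    simpa using h

lemma pvCharList_eq_of (v : String)
    (h : ¬ (PySem.Str.stripChars (PySem.Str.strip v) "[]" = "" ∨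
       PySem.Str.lower (PySem.Str.stripChars (PySem.Str.strip v) "[]") ∈
         (["none", "unknown", "n/a"] : List String))) :
    pvCharList v =
      ((PySem.Str.split? (PySem.Str.stripChars (PySem.Str.strip v) "[]") ",").getD []).map
        PySem.Str.strip := by
  simp only [pvCharList]
  rw [if_neg h]

set_option maxHeartbeats 1000000 in
lemma pvStep1 (st : Bool × List String × String) (x : String) :
    (pvStep st x).1 = (pvLastPayload [PySem.Str.strip x] "DIALOGUE:" (fun _ => true)).elim st.1
      (fun v => PySem.Str.isIn "YES" (PySem.Str.upper (PySem.Str.strip v))) := by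
  by_cases hD : PySem.Chars.startswith (PySem.Chars.strip x.toList) ['D','I','A','L','O','G','U','E',':'] = true
  · simp [pvStep, pvLastPayload, hD]
  · by_cases hC : PySem.Chars.startswith (PySem.Chars.strip x.toList) ['C','H','A','R','A','C','T','E','R','S',':'] = true <;>
      by_cases hR : PySem.Chars.startswith (PySem.Chars.strip x.toList) ['R','E','A','S','O','N','I','N','G',':'] = true <;>
        simp [pvStep, pvLastPayload, hD, hC, hR] <;> split_ifs <;> rfl

set_option maxHeartbeats 1600000 in
lemma pvStep2 (st : Bool × List String × String) (x : String) :
    (pvStep st x).2.1 = (pvLastPayload [PySem.Str.strip x] "CHARACTERS:"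
      (fun v => decide (pvCharList v ≠ []))).elim st.2.1 pvCharList := by
  by_cases hC : PySem.Chars.startswith (PySem.Chars.strip x.toList) ['C','H','A','R','A','C','T','E','R','S',':'] = true
  · have hD : PySem.Chars.startswith (PySem.Chars.strip x.toList) ['D','I','A','L','O','G','U','E',':'] = false :=
      pvChars_excl _ _ _ hC (by decide) (by decide)
    by_cases hok : pvCharList (pvPayload (PySem.Str.strip x)) = []
    · have h := (pvCharList_eq_nil_iff _).mp hok
      simp [pvStep, pvLastPayload, hD, hC, hok]
      split_ifs with hA
      · exfalso
        simp only [List.mem_cons, List.not_mem_nil, or_false] at h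
        rcases h with h | h | h | h
        exacts [hA.1 h, hA.2.1 h, hA.2.2.1 h, hA.2.2.2 h]
      · rfl
    · have h : ¬ (PySem.Str.stripChars (PySem.Str.strip (pvPayload (PySem.Str.strip x))) "[]" = "" ∨
          PySem.Str.lower (PySem.Str.stripChars (PySem.Str.strip (pvPayload (PySem.Str.strip x))) "[]") ∈
            (["none", "unknown", "n/a"] : List String)) := fun hc => hok ((pvCharList_eq_nil_iff _).mpr hc)
      simp [pvStep, pvLastPayload, hD, hC, hok]
      split_ifs with hA
      · simp [pvCharList_eq_of _ h]
      · exfalso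
        simp only [not_or, List.mem_cons, List.not_mem_nil, or_false] at h
        exact hA ⟨h.1, h.2.1, h.2.2.1, h.2.2.2⟩
  · by_cases hD : PySem.Chars.startswith (PySem.Chars.strip x.toList) ['D','I','A','L','O','G','U','E',':'] = true <;>
      by_cases hR : PySem.Chars.startswith (PySem.Chars.strip x.toList) ['R','E','A','S','O','N','I','N','G',':'] = true <;>
        simp [pvStep, pvLastPayload, hD, hC, hR]

set_option maxHeartbeats 1000000 in
lemma pvStep3 (st : Bool × List String × String) (x : String) :
    (pvStep st x).2.2 = (pvLastPayload [PySem.Str.strip x] "REASONING:" (fun _ => true)).elim st.2.2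
      PySem.Str.strip := by
  by_cases hR : PySem.Chars.startswith (PySem.Chars.strip x.toList) ['R','E','A','S','O','N','I','N','G',':'] = true
  · have hD : PySem.Chars.startswith (PySem.Chars.strip x.toList) ['D','I','A','L','O','G','U','E',':'] = false :=
      pvChars_excl _ _ _ hR (by decide) (by decide)
    have hC : PySem.Chars.startswith (PySem.Chars.strip x.toList) ['C','H','A','R','A','C','T','E','R','S',':'] = false :=
      pvChars_excl _ _ _ hR (by decide) (by decide)
    simp [pvStep, pvLastPayload, hD, hC, hR]
  · by_cases hD : PySem.Chars.startswith (PySem.Chars.strip x.toList) ['D','I','A','L','O','G','U','E',':'] = true <;>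
      by_cases hC : PySem.Chars.startswith (PySem.Chars.strip x.toList) ['C','H','A','R','A','C','T','E','R','S',':'] = true <;>
        simp [pvStep, pvLastPayload, hD, hC, hR] <;> split_ifs <;> rfl

lemma pvElim_or {α β : Type} (o s : Option α) (a b : β) (f : α → β)
    (h : a = s.elim b f) : o.elim a f = (o.or s).elim b f := by
  cases o <;> simp [h]

lemma pvFold_eq (L : List String) (st : Bool × List String × String) :
    L.foldl pvStep st =
      ( (pvLastPayload (L.map PySem.Str.strip).reverse "DIALOGUE:" (fun _ => true)).elim st.1
          (fun v => PySem.Str.isIn "YES" (PySem.Str.upper (PySem.Str.strip v))),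
        (pvLastPayload (L.map PySem.Str.strip).reverse "CHARACTERS:"
          (fun v => decide (pvCharList v ≠ []))).elim st.2.1 pvCharList,
        (pvLastPayload (L.map PySem.Str.strip).reverse "REASONING:" (fun _ => true)).elim st.2.2
          PySem.Str.strip ) := by
  induction L generalizing st with
  | nil => simp [pvLastPayload]
  | cons x rest ih =>
      rw [List.foldl_cons, ih]
      simp only [List.map_cons, List.reverse_cons, pvLastPayload_append]
      exact Prod.ext (pvElim_or _ _ _ _ _ (pvStep1 st x))
        (Prod.ext (pvElim_or _ _ _ _ _ (pvStep2 st x)) (pvElim_or _ _ _ _ _ (pvStep3 st x)))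


-- ===== VERDICT (by name: the statement is the Claim_ definition above) =====
theorem parse_detection_response_py_spec : Claim_equal_parse_detection_response_py := by
  intro response _
  show _ = _
  unfold parse_detection_response_py parse_detection_response_py_alt
  rw [pvFold_eq]
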